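-- pv_equiv track=rewrite | github.com/daniel-reich/ubiquitous-fiesta | HzeTvQqnH2afZs6GY_5.py | generate_rug
-- ===== SOURCE A (Python) =====
-- def generate_rug(n, direction):
--   A=list(range(n))
--   M=[[]]*n
--   if direction=="left":
--     for i in range(n):
--       M[i]=(A[1:i+1][::-1]+A[:n-i])
--   else:
--     for i in range(n):
--       M[i]=(A[:n-i][::-1]+A[1:i+1])
--   return M
-- ===== SOURCE B (Python) =====
-- def generate_rug(n, direction):
--   js = list(range(n))
--   if direction == "left":
--     return [[abs(i - j) for j in js] for i in js]
--   return [[abs(i - (n - 1 - j)) for j in js] for i in js]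
-- ===== Notes on version B (the rewrite author's own statement) =====
-- stated objective: simpler
-- what changed: Each cell is computed directly by the closed form abs(i-j) (mirrored per row for the non-left direction) in a nested comprehension, instead of building an index list and assembling each row from reversed and concatenated slices of it.
import Mathlib
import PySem

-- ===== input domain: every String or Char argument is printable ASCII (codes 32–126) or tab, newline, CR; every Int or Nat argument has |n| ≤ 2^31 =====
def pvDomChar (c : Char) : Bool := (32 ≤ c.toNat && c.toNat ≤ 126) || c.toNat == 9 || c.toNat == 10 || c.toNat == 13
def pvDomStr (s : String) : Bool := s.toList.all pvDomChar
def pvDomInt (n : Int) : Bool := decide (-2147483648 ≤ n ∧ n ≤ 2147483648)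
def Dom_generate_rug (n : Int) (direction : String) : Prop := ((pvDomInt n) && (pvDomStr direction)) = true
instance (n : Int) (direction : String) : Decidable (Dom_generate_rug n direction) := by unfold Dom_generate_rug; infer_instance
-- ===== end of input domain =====

-- B computes each cell abs(i-j) (mirrored per row when direction ≠ "left") directly, instead of
-- assembling rows from reversed/concatenated slices of an index list; objective: simpler.

-- ===== PORT A =====
-- A=list(range(n)); M=[[]]*n; then one slice-assembly loop per direction; xs[::-1] ported as .reverse (exact, PySem.List.slice?_none_none_neg_one)
def generate_rug (n : Int) (direction : String) : List (List Int) :=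
  let A : List Int := PySem.List.pyRange 0 n 1
  let M : List (List Int) := List.replicate n.toNat []
  if direction = "left" then
    (PySem.List.pyRange 0 n 1).foldl
      (fun M i => PySem.List.pySetD M i
        ((PySem.List.slice A (some 1) (some (i+1))).reverse ++ PySem.List.slice A none (some (n - i)))) M
  else
    (PySem.List.pyRange 0 n 1).foldl
      (fun M i => PySem.List.pySetD M i
        ((PySem.List.slice A none (some (n - i))).reverse ++ PySem.List.slice A (some 1) (some (i+1)))) M

-- ===== PORT B =====
def generate_rug_alt (n : Int) (direction : String) : List (List Int) :=
  let js : List Int := PySem.List.pyRange 0 n 1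
  if direction = "left" then
    js.map (fun i => js.map (fun j => |i - j|))
  else
    js.map (fun i => js.map (fun j => |i - (n - 1 - j)|))

-- ===== PRECONDITION & SPEC =====
def Spec_generate_rug (n : Int) (direction : String) (out : List (List Int)) : Prop := out = generate_rug_alt n direction
instance (n : Int) (direction : String) (out : List (List Int)) : Decidable (Spec_generate_rug n direction out) := by unfold Spec_generate_rug; infer_instance

-- ===== CLAIM (what is proved, stated in full; the proofs are below) =====
def Claim_equal_generate_rug : Prop := ∀ (n : Int) (direction : String), Dom_generate_rug n direction → Spec_generate_rug n direction (generate_rug n direction)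

-- ===== LEMMAS AND PROOFS =====

-- the M[i]=f(i) loop over range fills the replicate-[] list with (map f range)
theorem fold_set_range (f : Int → List Int) (k : Nat) :
    ∀ (a : Int) (M : List (List Int)), 0 ≤ a → (M.length : Int) = a + k →
    (PySem.List.pyRange a (a + k) 1).foldl (fun M i => PySem.List.pySetD M i (f i)) M
      = M.take a.toNat ++ (PySem.List.pyRange a (a + k) 1).map f := by
  induction k with
  | zero =>
    intro a M ha hlen
    rw [PySem.List.pyRange_one_eq_nil (by omega)]
    simp
    omega
  | succ k ih =>
    intro a M ha hlen
    rw [PySem.List.pyRange_one_cons (by omega)]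
    simp only [List.foldl_cons, List.map_cons]
    rw [PySem.List.pySetD_of_nonneg M (f a) ha]
    have h1 : (a : Int) + (k + 1 : Nat) = (a + 1) + (k : Nat) := by push_cast; ring
    rw [h1, ih (a+1) (M.set a.toNat (f a)) (by omega) (by simp; omega)]
    have hlt : a.toNat < M.length := by omega
    have h2 : (M.set a.toNat (f a)).take (a+1).toNat = M.take a.toNat ++ [f a] := by
      have he : (a+1).toNat = a.toNat + 1 := by omega
      rw [he, List.take_add_one, List.take_set, List.set_eq_of_length_le (by simp)]
      congr 1
      simp [hlt]
    rw [h2, List.append_assoc]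
    simp

theorem fold_all (n : Int) (f : Int → List Int) :
    (PySem.List.pyRange 0 n 1).foldl (fun M i => PySem.List.pySetD M i (f i)) (List.replicate n.toNat [])
      = (PySem.List.pyRange 0 n 1).map f := by
  by_cases hn : n ≤ 0
  · rw [PySem.List.pyRange_one_eq_nil (by omega)]
    simp [Int.toNat_of_nonpos hn]
  · have := fold_set_range f n.toNat 0 (List.replicate n.toNat []) (le_refl 0)
      (by simp)
    rw [show (0:Int) + (n.toNat : Nat) = n from by omega] at this
    simpa using this

-- A[1:i+1] is the range segment [1, i+1)
theorem slice_mid (n i : Int) (h0 : 0 ≤ i) (hn : i < n) :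
    PySem.List.slice (PySem.List.pyRange 0 n 1) (some 1) (some (i+1))
      = PySem.List.pyRange 1 (i+1) 1 := by
  rw [PySem.List.slice_toNat _ (by omega) (by omega),
      PySem.List.pyRange_one 0 n, PySem.List.pyRange_one 1 (i+1)]
  apply List.ext_getElem
  · simp; omega
  · intro k h1 h2
    simp at h1 h2 ⊢
    omega

-- A[:n-i] is the range segment [0, n-i)
theorem slice_init (n i : Int) (h0 : 0 ≤ i) (hn : i < n) :
    PySem.List.slice (PySem.List.pyRange 0 n 1) none (some (n - i))
      = PySem.List.pyRange 0 (n - i) 1 := by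
  rw [PySem.List.slice_to _ (by omega),
      PySem.List.pyRange_one 0 n, PySem.List.pyRange_one 0 (n-i), ← List.map_take,
      List.take_range]
  congr 2
  omega

-- left row i of A equals the closed-form row
theorem left_row (n i : Int) (h0 : 0 ≤ i) (hn : i < n) :
    (PySem.List.slice (PySem.List.pyRange 0 n 1) (some 1) (some (i+1))).reverse
      ++ PySem.List.slice (PySem.List.pyRange 0 n 1) none (some (n - i))
      = (PySem.List.pyRange 0 n 1).map (fun j => |i - j|) := by
  rw [slice_mid n i h0 hn, slice_init n i h0 hn]
  have hr : (PySem.List.pyRange 1 (i+1) 1).reverse = PySem.List.pyRange i 0 (-1) := by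
    have := (PySem.List.pyRange_neg_one_eq_reverse i 0).symm
    norm_num at this
    exact this
  rw [hr, PySem.List.pyRange_neg_one i 0,
      PySem.List.pyRange_one 0 (n - i), PySem.List.pyRange_one 0 n, List.map_map,
      show i - 0 = i from by ring, show n - i - 0 = n - i from by ring,
      show n - 0 = n from by ring,
      show n.toNat = i.toNat + (n - i).toNat from by omega,
      List.range_add, List.map_append, List.map_map]
  congr 1
  · apply List.map_congr_left
    intro k hk
    simp at hk ⊢
    rw [abs_of_nonneg (by omega)]
  · apply List.map_congr_left
    intro k hk
    simp
    rw [abs_of_nonpos (by omega)]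
    omega

-- else row i of A equals the closed-form mirrored row
theorem right_row (n i : Int) (h0 : 0 ≤ i) (hn : i < n) :
    (PySem.List.slice (PySem.List.pyRange 0 n 1) none (some (n - i))).reverse
      ++ PySem.List.slice (PySem.List.pyRange 0 n 1) (some 1) (some (i+1))
      = (PySem.List.pyRange 0 n 1).map (fun j => |i - (n - 1 - j)|) := by
  have h := congrArg List.reverse (left_row n i h0 hn)
  rw [List.reverse_append, List.reverse_reverse] at h
  rw [h, ← List.map_reverse]
  have hrev : (PySem.List.pyRange 0 n 1).reverse = PySem.List.pyRange (n-1) (-1) (-1) := by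
    have := (PySem.List.pyRange_neg_one_eq_reverse (n-1) (-1)).symm
    norm_num at this
    exact this
  rw [hrev, PySem.List.pyRange_neg_one (n-1) (-1),
      PySem.List.pyRange_one 0 n, List.map_map, List.map_map,
      show n - 1 - -1 = n from by ring, show n - 0 = n from by ring]
  apply List.map_congr_left
  intro k hk
  simp

-- ===== VERDICT (by name: the statement is the Claim_ definition above) =====
theorem generate_rug_spec : Claim_equal_generate_rug := by
  intro n direction _
  unfold Spec_generate_rug generate_rug generate_rug_alt
  by_cases hd : direction = "left"
  · simp only [hd, if_true]
    rw [fold_all]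
    apply List.map_congr_left
    intro i hi
    rw [PySem.List.mem_pyRange_one] at hi
    exact left_row n i hi.1 hi.2
  · simp only [hd, if_false]
    rw [fold_all]
    apply List.map_congr_left
    intro i hi
    rw [PySem.List.mem_pyRange_one] at hi
    exact right_row n i hi.1 hi.2
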